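-- pv_equiv track=rewrite | github.com/SimmoRice/ai-scrum-master-v2 | analyze_project.py | parse_tasks_from_analysis
-- ===== SOURCE A (Python) =====
-- from typing import List, Dict
--
-- def parse_tasks_from_analysis(analysis: str) -> List[Dict[str, str]]:
--     """
--     Parse tasks from the analysis markdown
--
--     Args:
--         analysis: Analysis markdown from Claude
--
--     Returns:
--         List of task dictionaries
--     """
--     tasks = []
--
--     # Simple parsing - look for task sections
--     # This is a basic implementation - could be enhanced with regex or LLM parsing
--     lines = analysis.split('\n')
--     current_task = {}
--
--     for line in lines:
--         line = line.strip()
--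
--         # Look for task markers
--         if line.startswith('**Title**:') or line.startswith('- **Title**:'):
--             if current_task:
--                 tasks.append(current_task)
--             current_task = {'title': line.split(':', 1)[1].strip()}
--         elif line.startswith('**Description**:') or line.startswith('- **Description**:'):
--             current_task['description'] = line.split(':', 1)[1].strip()
--         elif line.startswith('**Priority**:') or line.startswith('- **Priority**:'):
--             current_task['priority'] = line.split(':', 1)[1].strip()
--         elif line.startswith('**Complexity**:') or line.startswith('- **Complexity**:'):
--             current_task['complexity'] = line.split(':', 1)[1].strip()
--         elif line.startswith('**Category**:') or line.startswith('- **Category**:'):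
--             current_task['category'] = line.split(':', 1)[1].strip()
--
--     if current_task:
--         tasks.append(current_task)
--
--     return tasks
-- ===== SOURCE B (Python) =====
-- from typing import List, Dict
--
-- _FIELDS = [
--     ('description', '**Description**:', '- **Description**:'),
--     ('priority', '**Priority**:', '- **Priority**:'),
--     ('complexity', '**Complexity**:', '- **Complexity**:'),
--     ('category', '**Category**:', '- **Category**:'),
-- ]
--
--
-- def _is_title(line: str) -> bool:
--     return line.startswith('**Title**:') or line.startswith('- **Title**:')
--
--
-- def _assign_fields(lines: List[str], d: Dict[str, str]) -> Dict[str, str]: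
--     for line in lines:
--         for key, p1, p2 in _FIELDS:
--             if line.startswith(p1) or line.startswith(p2):
--                 d[key] = line.split(':', 1)[1].strip()
--                 break
--     return d
--
--
-- def parse_tasks_from_analysis(analysis: str) -> List[Dict[str, str]]:
--     # Pass 1: partition stripped lines into a leading block and title-started blocks.
--     lines = [line.strip() for line in analysis.split('\n')]
--     started = False
--     leading: List[str] = []
--     blocks: List[List[str]] = []
--     cur: List[str] = []
--     for line in lines:
--         if _is_title(line):
--             if started:
--                 blocks.append(cur)
--             else:
--                 leading = cur
--                 started = True
--             cur = [line]
--         else: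
--             cur.append(line)
--     if started:
--         blocks.append(cur)
--     else:
--         leading = cur
--     # Pass 2: map each block to its task dictionary.
--     tasks: List[Dict[str, str]] = []
--     d0 = _assign_fields(leading, {})
--     if d0:
--         tasks.append(d0)
--     for b in blocks:
--         d = {'title': b[0].split(':', 1)[1].strip()}
--         tasks.append(_assign_fields(b[1:], d))
--     return tasks
-- ===== Notes on version B (the rewrite author's own statement) =====
-- stated objective: alternative
-- what changed: B replaces A's single pass with a mutating current-task dict by a two-pass design: first partition the stripped lines into a leading block plus Title-started blocks, then map each block to its dict via a table-driven field assignment.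
import Mathlib
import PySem

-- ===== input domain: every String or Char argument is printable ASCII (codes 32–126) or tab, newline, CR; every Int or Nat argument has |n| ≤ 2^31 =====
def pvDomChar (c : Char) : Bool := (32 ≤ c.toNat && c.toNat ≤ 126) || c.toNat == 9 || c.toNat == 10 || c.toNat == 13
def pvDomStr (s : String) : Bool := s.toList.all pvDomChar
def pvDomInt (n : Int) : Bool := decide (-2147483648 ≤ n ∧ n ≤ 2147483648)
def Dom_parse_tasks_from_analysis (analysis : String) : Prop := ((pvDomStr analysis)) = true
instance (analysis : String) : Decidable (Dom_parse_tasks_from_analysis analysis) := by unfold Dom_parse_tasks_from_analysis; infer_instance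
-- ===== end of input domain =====

-- B re-groups the work (partition lines into blocks, then map each block to a dict) instead of
-- A's single pass over lines with a mutating current dict; same O(n) cost, alternative structure.

-- shared helper: line.split(':', 1)[1].strip() — exact whenever ':' occurs in line, which every
-- call site guarantees via a startswith test on a prefix ending in ':'
def pvColonVal (l : String) : String :=
  PySem.Str.strip (PySem.List.pyGetD ((PySem.Str.splitMax? l ":" 1).getD []) 1 "")

def pvIsTitle (l : String) : Bool :=
  PySem.Str.startswith l "**Title**:" || PySem.Str.startswith l "- **Title**:"

-- ===== PORT A =====
def pvAStep (st : List (List (String × String)) × PySem.Dict String String) (line0 : String) :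
    List (List (String × String)) × PySem.Dict String String :=
  let line := PySem.Str.strip line0
  if pvIsTitle line then
    let tasks := if st.2.items ≠ [] then st.1 ++ [st.2.items] else st.1
    (tasks, (PySem.Dict.empty : PySem.Dict String String).insert "title" (pvColonVal line))
  else if PySem.Str.startswith line "**Description**:" || PySem.Str.startswith line "- **Description**:" then
    (st.1, st.2.insert "description" (pvColonVal line))
  else if PySem.Str.startswith line "**Priority**:" || PySem.Str.startswith line "- **Priority**:" then
    (st.1, st.2.insert "priority" (pvColonVal line))
  else if PySem.Str.startswith line "**Complexity**:" || PySem.Str.startswith line "- **Complexity**:" then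
    (st.1, st.2.insert "complexity" (pvColonVal line))
  else if PySem.Str.startswith line "**Category**:" || PySem.Str.startswith line "- **Category**:" then
    (st.1, st.2.insert "category" (pvColonVal line))
  else st

def parse_tasks_from_analysis (analysis : String) : List (List (String × String)) :=
  let lines := (PySem.Str.split? analysis "\n").getD []
  let r := lines.foldl pvAStep ([], (PySem.Dict.empty : PySem.Dict String String))
  if r.2.items ≠ [] then r.1 ++ [r.2.items] else r.1

-- ===== PORT B =====
def pvFields : List (String × String × String) :=
  [("description", "**Description**:", "- **Description**:"),
   ("priority", "**Priority**:", "- **Priority**:"),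
   ("complexity", "**Complexity**:", "- **Complexity**:"),
   ("category", "**Category**:", "- **Category**:")]

def pvAssignFields : List (String × String × String) → String → PySem.Dict String String →
    PySem.Dict String String
  | [], _, d => d
  | (k, p1, p2) :: rest, l, d =>
    if PySem.Str.startswith l p1 || PySem.Str.startswith l p2 then d.insert k (pvColonVal l)
    else pvAssignFields rest l d

def pvFFold (d : PySem.Dict String String) (ls : List String) : PySem.Dict String String :=
  ls.foldl (fun d l => pvAssignFields pvFields l d) d

def pvBStep (st : Bool × List String × List (List String) × List String) (l : String) :
    Bool × List String × List (List String) × List String :=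
  match st with
  | (started, leading, blocks, cur) =>
    if pvIsTitle l then
      if started then (true, leading, blocks ++ [cur], [l])
      else (true, cur, blocks, [l])
    else (started, leading, blocks, cur ++ [l])

def pvBlockDict (b : List String) : List (String × String) :=
  (pvFFold ((PySem.Dict.empty : PySem.Dict String String).insert "title"
      (pvColonVal (PySem.List.pyGetD b 0 ""))) (b.drop 1)).items

def parse_tasks_from_analysis_alt (analysis : String) : List (List (String × String)) :=
  let lines := ((PySem.Str.split? analysis "\n").getD []).map PySem.Str.strip
  let st := lines.foldl pvBStep (false, [], [], [])
  let lead := if st.1 then st.2.1 else st.2.2.2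
  let blocks := if st.1 then st.2.2.1 ++ [st.2.2.2] else st.2.2.1
  let d0 := (pvFFold PySem.Dict.empty lead).items
  (if d0 ≠ [] then [d0] else []) ++ blocks.map pvBlockDict

-- ===== PRECONDITION & SPEC =====
def Spec_parse_tasks_from_analysis (analysis : String) (out : List (List (String × String))) : Prop := out = parse_tasks_from_analysis_alt analysis
instance (analysis : String) (out : List (List (String × String))) : Decidable (Spec_parse_tasks_from_analysis analysis out) := by unfold Spec_parse_tasks_from_analysis; infer_instance

-- ===== CLAIM (what is proved, stated in full; the proofs are below) =====
def Claim_equal_parse_tasks_from_analysis : Prop := ∀ (analysis : String), Dom_parse_tasks_from_analysis analysis → Spec_parse_tasks_from_analysis analysis (parse_tasks_from_analysis analysis)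

-- ===== LEMMAS AND PROOFS =====

-- common recursive specification of the stream of emitted task dicts (proof-side only)
def pvEmit (d : PySem.Dict String String) : List (List (String × String)) :=
  if d.items ≠ [] then [d.items] else []

def pvSpec : PySem.Dict String String → List String → List (List (String × String))
  | d, [] => pvEmit d
  | d, l :: ls =>
    if pvIsTitle l then
      pvEmit d ++ pvSpec ((PySem.Dict.empty : PySem.Dict String String).insert "title" (pvColonVal l)) ls
    else pvSpec (pvAssignFields pvFields l d) ls

-- the table-driven field assignment computes exactly A's elif ladder on the four field keys
theorem pvAssignFields_eq (l : String) (d : PySem.Dict String String) :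
    pvAssignFields pvFields l d =
      if PySem.Str.startswith l "**Description**:" || PySem.Str.startswith l "- **Description**:" then
        d.insert "description" (pvColonVal l)
      else if PySem.Str.startswith l "**Priority**:" || PySem.Str.startswith l "- **Priority**:" then
        d.insert "priority" (pvColonVal l)
      else if PySem.Str.startswith l "**Complexity**:" || PySem.Str.startswith l "- **Complexity**:" then
        d.insert "complexity" (pvColonVal l)
      else if PySem.Str.startswith l "**Category**:" || PySem.Str.startswith l "- **Category**:" then
        d.insert "category" (pvColonVal l)
      else d := by
  simp only [pvFields, pvAssignFields]

-- A's per-state finalization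
def pvFinA (r : List (List (String × String)) × PySem.Dict String String) :
    List (List (String × String)) :=
  if r.2.items ≠ [] then r.1 ++ [r.2.items] else r.1

-- B's finalization of the pass-1 state
def pvFinB (st : Bool × List String × List (List String) × List String) :
    List (List (String × String)) :=
  match st with
  | (started, leading, blocks, cur) =>
    pvEmit (pvFFold PySem.Dict.empty (if started then leading else cur)) ++
      (if started then blocks ++ [cur] else blocks).map pvBlockDict

theorem items_ne_of_get? {d : PySem.Dict String String} {k v : String}
    (h : d.get? k = some v) : d.items ≠ [] := by
  intro he; cases d; simp_all [PySem.Dict.get?]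

theorem pvAssignFields_get_title (l : String) (d : PySem.Dict String String) :
    (pvAssignFields pvFields l d).get? "title" = d.get? "title" := by
  rw [pvAssignFields_eq]
  split_ifs <;> first
    | rfl
    | rw [PySem.Dict.get?_insert_of_ne _ _ (by decide)]

theorem pvFFold_get_title (ls : List String) :
    ∀ d : PySem.Dict String String, (pvFFold d ls).get? "title" = d.get? "title" := by
  induction ls with
  | nil => intro d; rfl
  | cons l ls ih =>
    intro d
    show (pvFFold (pvAssignFields pvFields l d) ls).get? "title" = d.get? "title"
    rw [ih, pvAssignFields_get_title]

theorem pvBlock_items_ne (t : String) (rest : List String) :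
    (pvFFold ((PySem.Dict.empty : PySem.Dict String String).insert "title" (pvColonVal t))
        rest).items ≠ [] := by
  have h := pvFFold_get_title rest
    ((PySem.Dict.empty : PySem.Dict String String).insert "title" (pvColonVal t))
  rw [PySem.Dict.get?_insert_self] at h
  exact items_ne_of_get? h

theorem pvFFold_append (d : PySem.Dict String String) (ls : List String) (l : String) :
    pvFFold d (ls ++ [l]) = pvAssignFields pvFields l (pvFFold d ls) := by
  simp [pvFFold, List.foldl_append]

theorem pvEmit_block (t : String) (rest : List String) :
    pvEmit (pvFFold ((PySem.Dict.empty : PySem.Dict String String).insert "title"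
        (pvColonVal t)) rest) =
      [(pvFFold ((PySem.Dict.empty : PySem.Dict String String).insert "title"
        (pvColonVal t)) rest).items] := by
  rw [pvEmit, if_pos (pvBlock_items_ne t rest)]

theorem pvBlockDict_cons (t : String) (rest : List String) :
    pvBlockDict (t :: rest) =
      (pvFFold ((PySem.Dict.empty : PySem.Dict String String).insert "title"
        (pvColonVal t)) rest).items := by
  simp [pvBlockDict, PySem.List.pyGetD, PySem.List.pyGet?, PySem.List.pyIdx?]

-- A's fold, finalized, emits its pending tasks and then the stream described by pvSpec
theorem pvA_run (ls : List String) :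
    ∀ (tasks : List (List (String × String))) (d : PySem.Dict String String),
      pvFinA (ls.foldl pvAStep (tasks, d)) = tasks ++ pvSpec d (ls.map PySem.Str.strip) := by
  induction ls with
  | nil =>
    intro tasks d
    simp only [List.foldl_nil, List.map_nil, pvFinA, pvSpec, pvEmit]
    split <;> simp
  | cons l ls ih =>
    intro tasks d
    simp only [List.foldl_cons, List.map_cons, pvSpec, pvAStep]
    by_cases h : pvIsTitle (PySem.Str.strip l)
    · simp only [h, if_true, ih, pvEmit]
      split <;> simp
    · simp only [h, if_false, Bool.false_eq_true, pvAssignFields_eq]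
      split_ifs <;> rw [ih]

-- B's fold after the first Title has been seen
theorem pvB_true (ls : List String) :
    ∀ (lead : List String) (blocks : List (List String)) (t : String) (rest : List String),
      pvFinB (ls.foldl pvBStep (true, lead, blocks, t :: rest)) =
        pvEmit (pvFFold PySem.Dict.empty lead) ++ blocks.map pvBlockDict ++
          pvSpec (pvFFold ((PySem.Dict.empty : PySem.Dict String String).insert "title"
            (pvColonVal t)) rest) ls := by
  induction ls with
  | nil =>
    intro lead blocks t rest
    simp only [List.foldl_nil, pvFinB, pvSpec, if_true]
    rw [pvEmit_block]
    simp [pvBlockDict_cons]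
  | cons l ls ih =>
    intro lead blocks t rest
    simp only [List.foldl_cons, pvBStep, pvSpec]
    by_cases h : pvIsTitle l
    · simp only [h, if_true, ih]
      rw [pvEmit_block]
      simp [pvFFold, pvBlockDict_cons]
    · simp only [h, if_false, Bool.false_eq_true]
      rw [show ((true, lead, blocks, t :: rest ++ [l]) :
            Bool × List String × List (List String) × List String) =
          (true, lead, blocks, t :: (rest ++ [l])) from rfl]
      rw [ih lead blocks t (rest ++ [l]), pvFFold_append]

-- B's fold before any Title line: the growing block is the leading block
theorem pvB_false (ls : List String) :
    ∀ (x cs : List String),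
      pvFinB (ls.foldl pvBStep (false, x, [], cs)) =
        pvSpec (pvFFold PySem.Dict.empty cs) ls := by
  induction ls with
  | nil => intro x cs; simp [pvFinB, pvSpec]
  | cons l ls ih =>
    intro x cs
    simp only [List.foldl_cons, pvBStep, pvSpec]
    by_cases h : pvIsTitle l
    · simp only [h, if_true]
      rw [show (if false = true then ((true, x, [] ++ [cs], [l]) : Bool × List String ×
            List (List String) × List String) else (true, cs, [], [l])) =
          (true, cs, [], [l]) from rfl]
      rw [pvB_true ls cs [] l []]
      simp [pvFFold]
    · simp only [h, if_false, Bool.false_eq_true]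
      rw [ih x (cs ++ [l]), pvFFold_append]

-- ===== VERDICT (by name: the statement is the Claim_ definition above) =====
theorem parse_tasks_from_analysis_spec : Claim_equal_parse_tasks_from_analysis := by
  intro analysis _
  unfold Spec_parse_tasks_from_analysis
  show parse_tasks_from_analysis analysis = parse_tasks_from_analysis_alt analysis
  have hA := pvA_run ((PySem.Str.split? analysis "\n").getD []) []
    (PySem.Dict.empty : PySem.Dict String String)
  have hB := pvB_false (((PySem.Str.split? analysis "\n").getD []).map PySem.Str.strip) [] []
  simp only [List.nil_append] at hA
  calc parse_tasks_from_analysis analysis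
      = pvFinA ((((PySem.Str.split? analysis "\n").getD []).foldl pvAStep
          ([], PySem.Dict.empty))) := rfl
    _ = pvSpec PySem.Dict.empty ((((PySem.Str.split? analysis "\n").getD []).map
          PySem.Str.strip)) := hA
    _ = pvFinB (((((PySem.Str.split? analysis "\n").getD []).map PySem.Str.strip)).foldl
          pvBStep (false, [], [], [])) := (hB).symm
    _ = parse_tasks_from_analysis_alt analysis := rfl
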